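-- pv_equiv track=rewrite | github.com/softkleenex/lgcpc-2025 | 2/solution_optimal.py | calculate_position_sum
-- ===== SOURCE A (Python) =====
-- MOD = 1000000007
--
-- def calculate_position_sum(n_str, pos, k):
--     """특정 위치에서의 총 기여도 계산"""
--     n = len(n_str)
--
--     # 해당 위치에 올 수 있는 숫자들의 합
--     digit_sum = 0
--     count_sum = 0
--
--     # tight 제한 고려
--     limit = int(n_str[pos])
--
--     for digit in range(0 if pos > 0 else 1, limit + 1):  # 첫 자리는 1부터
--         if digit == k:
--             continue
--
--         # 이 digit이 pos 위치에 올 때의 경우의 수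
--         ways = count_numbers_with_digit_at_position(n_str, pos, digit, k)
--
--         if ways > 0:
--             # 이 digit이 최종 결과에서 가질 자릿수 위치
--             result_position = estimate_result_position(pos, n, k)
--
--             # 기여도 = digit * 10^result_position * ways
--             contribution = (digit * pow(10, result_position, MOD) * ways) % MOD
--             digit_sum = (digit_sum + contribution) % MOD
--
--     return digit_sum
--
-- def count_numbers_with_digit_at_position(n_str, pos, digit, k):
--     """pos 위치에 특정 digit이 오는 수의 개수"""
--     n = len(n_str)
--
--     # pos 앞쪽 자릿수들의 경우의 수
--     front_ways = 1
--     for i in range(pos):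
--         if i == 0:
--             # 첫 자리: 1~9에서 k 제외
--             ways = 8 if k != 0 else 9
--         else:
--             # 나머지: 0~9에서 k 제외
--             ways = 9
--         front_ways = (front_ways * ways) % MOD
--
--     # pos 뒤쪽 자릿수들의 경우의 수
--     back_ways = 1
--     for i in range(pos + 1, n):
--         back_ways = (back_ways * 9) % MOD  # 0~9에서 k 제외
--
--     # tight 제한 고려한 실제 경우의 수
--     actual_ways = calculate_actual_ways(n_str, pos, digit, k, front_ways, back_ways)
--
--     return actual_ways
--
-- def calculate_actual_ways(n_str, pos, digit, k, front_ways, back_ways):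
--     """tight 제한을 고려한 실제 경우의 수"""
--     n = len(n_str)
--
--     # 기본적인 경우의 수
--     basic_ways = (front_ways * back_ways) % MOD
--
--     # tight 제한에 의한 조정이 필요한지 확인
--     current_limit = int(n_str[pos])
--     if digit <= current_limit:
--         return basic_ways
--     else:
--         return 0
--
-- def estimate_result_position(original_pos, total_len, k):
--     """k 제거 후 해당 자릿수의 위치 추정"""
--     # 원래 위치에서 뒤쪽에 있는 자릿수들 중 k가 제거될 개수 추정
--     remaining_positions = total_len - original_pos - 1
--     expected_k_removals = remaining_positions // 10  # 대략 1/10 확률로 k 등장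
--
--     result_pos = remaining_positions - expected_k_removals
--     return max(0, result_pos)
-- ===== SOURCE B (Python) =====
-- MOD = 1000000007
--
-- def calculate_position_sum(n_str, pos, k):
--     # Closed form: the in-loop tight check never fails, so ways and the result
--     # position are digit-independent; sum the admissible digits arithmetically.
--     n = len(n_str)
--     limit = int(n_str[pos])
--     start = 0 if pos > 0 else 1
--     if pos > 0:
--         front = (9 if k == 0 else 8) * pow(9, pos - 1, MOD) % MOD
--     else:
--         front = 1
--     back = pow(9, n - pos - 1, MOD)
--     remaining = n - pos - 1
--     rp = max(0, remaining - remaining // 10)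
--     if start > limit:
--         digit_total = 0
--     else:
--         digit_total = (start + limit) * (limit - start + 1) // 2
--         if start <= k <= limit:
--             digit_total -= k
--     return digit_total * pow(10, rp, MOD) % MOD * front % MOD * back % MOD
-- ===== Notes on version B (the rewrite author's own statement) =====
-- stated objective: simpler
-- what changed: A's per-digit loop (which recomputes the front/back way-count loops for every digit) is replaced by one closed-form product: front and back way counts via modular powers and the digit sum via the arithmetic-series formula with a k-exclusion.
import Mathlib
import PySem

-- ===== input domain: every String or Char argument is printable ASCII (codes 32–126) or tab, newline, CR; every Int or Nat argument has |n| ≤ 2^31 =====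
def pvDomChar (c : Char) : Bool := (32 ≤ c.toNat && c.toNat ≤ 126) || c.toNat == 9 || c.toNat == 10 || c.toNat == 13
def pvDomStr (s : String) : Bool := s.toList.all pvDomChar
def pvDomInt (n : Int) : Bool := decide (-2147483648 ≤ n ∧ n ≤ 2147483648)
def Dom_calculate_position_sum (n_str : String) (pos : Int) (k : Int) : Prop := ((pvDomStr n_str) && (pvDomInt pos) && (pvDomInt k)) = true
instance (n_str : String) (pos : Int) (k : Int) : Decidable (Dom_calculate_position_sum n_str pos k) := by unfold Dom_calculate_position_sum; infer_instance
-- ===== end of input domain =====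

-- B replaces A's per-digit loop and per-digit helper recomputation by one closed-form product
-- (arithmetic series of digits × closed-form front/back way counts); objective: simpler.

def pvMOD : Int := 1000000007

-- int(n_str[pos]) for the admitted inputs: Pre_ guarantees the indexed char is an ASCII
-- digit, on which int(c) is exactly code-48; out-of-range / non-digit inputs (Python raises
-- ValueError/IndexError) are excluded by Pre_, the 0 default is never reached there.
def pvDigitAt (n_str : String) (pos : Int) : Int :=
  match PySem.Str.pyGet? n_str pos with
  | some c => (c.toNat : Int) - 48
  | none => 0

-- ===== PORT A =====
def estimate_result_position (original_pos total_len k : Int) : Int :=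
  let remaining := total_len - original_pos - 1
  let expected_k_removals := PySem.Int.floordiv remaining 10
  max 0 (remaining - expected_k_removals)

def calculate_actual_ways (n_str : String) (pos digit k front_ways back_ways : Int) : Int :=
  let basic_ways := PySem.Int.mod (front_ways * back_ways) pvMOD
  let current_limit := pvDigitAt n_str pos
  if digit ≤ current_limit then basic_ways else 0

def count_numbers_with_digit_at_position (n_str : String) (pos digit k : Int) : Int :=
  let n := PySem.Str.len n_str
  let front_ways := (PySem.List.pyRange 0 pos 1).foldl
    (fun fw i => PySem.Int.mod (fw * (if i = 0 then (if k ≠ 0 then 8 else 9) else 9)) pvMOD) 1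
  let back_ways := (PySem.List.pyRange (pos + 1) n 1).foldl
    (fun bw _ => PySem.Int.mod (bw * 9) pvMOD) 1
  calculate_actual_ways n_str pos digit k front_ways back_ways

def calculate_position_sum (n_str : String) (pos : Int) (k : Int) : Int :=
  let n := PySem.Str.len n_str
  let limit := pvDigitAt n_str pos
  (PySem.List.pyRange (if pos > 0 then 0 else 1) (limit + 1) 1).foldl
    (fun digit_sum digit =>
      if digit = k then digit_sum
      else
        let ways := count_numbers_with_digit_at_position n_str pos digit k
        if ways > 0 then
          let result_position := estimate_result_position pos n k
          let contribution :=
            PySem.Int.mod (digit * PySem.Int.powMod 10 result_position.toNat pvMOD * ways) pvMOD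
          PySem.Int.mod (digit_sum + contribution) pvMOD
        else digit_sum) 0

-- ===== PORT B =====
def calculate_position_sum_alt (n_str : String) (pos : Int) (k : Int) : Int :=
  let n := PySem.Str.len n_str
  let limit := pvDigitAt n_str pos
  let start : Int := if pos > 0 then 0 else 1
  let front : Int :=
    if pos > 0 then
      PySem.Int.mod ((if k = 0 then 9 else 8) * PySem.Int.powMod 9 (pos - 1).toNat pvMOD) pvMOD
    else 1
  let back : Int := PySem.Int.powMod 9 (n - pos - 1).toNat pvMOD
  let remaining := n - pos - 1
  let rp := max 0 (remaining - PySem.Int.floordiv remaining 10)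
  let digit_total : Int :=
    if start > limit then 0
    else
      PySem.Int.floordiv ((start + limit) * (limit - start + 1)) 2 -
        (if start ≤ k ∧ k ≤ limit then k else 0)
  PySem.Int.mod (PySem.Int.mod (PySem.Int.mod
    (digit_total * PySem.Int.powMod 10 rp.toNat pvMOD) pvMOD * front) pvMOD * back) pvMOD

-- ===== PRECONDITION & SPEC =====
-- Pre_: Python raises exactly when n_str[pos] is out of range (IndexError) or the indexed
-- character is not a decimal digit (int() ValueError); nothing else is excluded.
def Pre_calculate_position_sum (n_str : String) (pos : Int) (k : Int) : Prop :=
  ((PySem.Str.pyGet? n_str pos).map Char.isDigit).getD false = true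
instance (n_str : String) (pos : Int) (k : Int) : Decidable (Pre_calculate_position_sum n_str pos k) := by
  unfold Pre_calculate_position_sum; infer_instance

def pvWitness_calculate_position_sum : String × Int × Int := ("274", 1, 0)

def Spec_calculate_position_sum (n_str : String) (pos : Int) (k : Int) (out : Int) : Prop := out = calculate_position_sum_alt n_str pos k
instance (n_str : String) (pos : Int) (k : Int) (out : Int) : Decidable (Spec_calculate_position_sum n_str pos k out) := by unfold Spec_calculate_position_sum; infer_instance

-- ===== CLAIM (what is proved, stated in full; the proofs are below) =====
def Claim_equal_calculate_position_sum : Prop := ∀ (n_str : String) (pos : Int) (k : Int), Dom_calculate_position_sum n_str pos k → Pre_calculate_position_sum n_str pos k → Spec_calculate_position_sum n_str pos k (calculate_position_sum n_str pos k)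

-- ===== LEMMAS AND PROOFS =====

lemma pv_h1 (a b : Int) : (a * (b % 1000000007)) % 1000000007 = (a * b) % 1000000007 := by
  rw [Int.mul_emod, Int.emod_emod_of_dvd _ dvd_rfl, ← Int.mul_emod]

lemma pv_h2 (a b : Int) : ((a % 1000000007) * b) % 1000000007 = (a * b) % 1000000007 := by
  rw [Int.mul_emod, Int.emod_emod_of_dvd _ dvd_rfl, ← Int.mul_emod]

lemma pvmod (a : Int) : PySem.Int.mod a pvMOD = a % 1000000007 :=
  PySem.Int.mod_eq_emod_of_pos (by norm_num [pvMOD])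

lemma pvpow (b : Int) (e : Nat) : PySem.Int.powMod b e pvMOD = (b ^ e) % 1000000007 := by
  rw [PySem.Int.powMod_eq, pvmod]

lemma pvfd2 (a : Int) : PySem.Int.floordiv a 2 = a / 2 :=
  PySem.Int.floordiv_eq_ediv_of_pos (by norm_num)

lemma pv_frontAux (w0 : Int) (m : Nat) :
    (PySem.List.pyRange 0 (m : Int) 1).foldl
      (fun fw i => (fw * (if i = 0 then w0 else 9)) % 1000000007) 1
    = if 0 < m then (w0 * 9 ^ (m - 1)) % 1000000007 else 1 := by
  induction m with
  | zero => simp [PySem.List.pyRange_one_eq_nil]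
  | succ j ih =>
    have h : PySem.List.pyRange 0 ((j : Int) + 1) 1 =
        PySem.List.pyRange 0 (j : Int) 1 ++ [(j : Int)] :=
      PySem.List.pyRange_one_succ_right (by positivity)
    push_cast
    rw [h, List.foldl_append, ih]
    rcases Nat.eq_zero_or_pos j with hj | hj
    · subst hj; norm_num
    · have hj' : ((j : Int)) ≠ 0 := by positivity
      simp only [if_pos hj, if_pos (Nat.succ_pos j), List.foldl_cons, List.foldl_nil,
        if_neg hj']
      rw [pv_h2]
      conv_rhs => rw [show j = j - 1 + 1 by omega]
      rw [pow_succ]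
      ring_nf

lemma pv_backAux (L : List Int) : ∀ (a : Int),
    L.foldl (fun bw _ => (bw * 9) % 1000000007) (a % 1000000007)
    = (a * 9 ^ L.length) % 1000000007 := by
  induction L with
  | nil => intro a; simp
  | cons c L ih =>
    intro a
    simp only [List.foldl_cons, List.length_cons]
    rw [pv_h2, ih (a * 9)]
    ring_nf

lemma pv_foldA (P W k : Int) (hW : 0 ≤ W) : ∀ (L : List Int) (a : Int),
    L.foldl (fun ds d => if d = k then ds
      else if 0 < W then (ds + (d * P * W) % 1000000007) % 1000000007 else ds)
      (a % 1000000007)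
    = (a + P * W * ((L.map (fun d => if d = k then 0 else d)).sum)) % 1000000007 := by
  intro L
  induction L with
  | nil => intro a; simp
  | cons d L ih =>
    intro a
    simp only [List.foldl_cons, List.map_cons, List.sum_cons]
    by_cases hd : d = k
    · rw [if_pos hd, if_pos hd, ih a]
      ring_nf
    · rw [if_neg hd, if_neg hd]
      by_cases hw : 0 < W
      · rw [if_pos hw, ← Int.add_emod, ih (a + d * P * W)]
        ring_nf
      · have hw0 : W = 0 := le_antisymm (not_lt.mp hw) hW
        rw [if_neg hw, ih a, hw0]
        ring_nf

lemma pv_sumAux (k s : Int) : ∀ (c : Nat),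
    ((PySem.List.pyRange s (s + (c : Int)) 1).map (fun d => if d = k then 0 else d)).sum
    = if c = 0 then 0
      else ((s + (s + (c : Int) - 1)) * (c : Int)) / 2 -
        (if s ≤ k ∧ k ≤ s + (c : Int) - 1 then k else 0) := by
  intro c
  induction c with
  | zero => simp [PySem.List.pyRange_one_eq_nil]
  | succ j ih =>
    have h : PySem.List.pyRange s (s + ((j : Int) + 1)) 1 =
        PySem.List.pyRange s (s + (j : Int)) 1 ++ [s + (j : Int)] := by
      have := PySem.List.pyRange_one_succ_right
        (show s ≤ s + (j : Int) by omega)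
      rw [← this]; ring_nf
    push_cast
    rw [h, List.map_append, List.sum_append, ih]
    simp only [List.map_cons, List.map_nil, List.sum_cons, List.sum_nil]
    rcases Nat.eq_zero_or_pos j with hj | hj
    · subst hj
      norm_num
      by_cases hk : k = s
      · rw [if_pos hk.symm, if_pos (by omega)]
        omega
      · rw [if_neg (fun h => hk h.symm), if_neg (by omega)]
        omega
    · have hkey : (s + (s + ((j : Int) + 1) - 1)) * ((j : Int) + 1)
          = (s + (s + (j : Int) - 1)) * (j : Int) + (s + (j : Int)) * 2 := by ring
      rw [hkey, Int.add_mul_ediv_right _ _ (by norm_num : (2:Int) ≠ 0)]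
      have hjz : (1:Int) ≤ (j:Int) := by exact_mod_cast hj
      split_ifs <;> omega

theorem calculate_position_sum_spec : Claim_equal_calculate_position_sum := by
  intro n_str pos k _ _
  unfold Spec_calculate_position_sum calculate_position_sum calculate_position_sum_alt
    count_numbers_with_digit_at_position calculate_actual_ways estimate_result_position
  simp only [pvmod, pvpow, pvfd2]
  set n := PySem.Str.len n_str with hn
  set lim := pvDigitAt n_str pos with hlim
  set w0 := (if k ≠ 0 then (8:Int) else 9) with hw0
  set F := List.foldl (fun fw i => (fw * if i = 0 then w0 else 9) % 1000000007) 1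
    (PySem.List.pyRange 0 pos) with hF
  set Bk : Int := List.foldl (fun bw _ => bw * 9 % 1000000007) 1
    (PySem.List.pyRange (pos + 1) n) with hBk
  set P := (10:Int) ^ (max 0 (n - pos - 1 - PySem.Int.floordiv (n - pos - 1) 10)).toNat %
    1000000007 with hP
  set W := F * Bk % 1000000007 with hWdef
  set s := (if pos > 0 then (0:Int) else 1) with hs
  have hWnn : 0 ≤ W := by rw [hWdef]; exact Int.emod_nonneg _ (by norm_num)
  -- clean the A-side loop body: every digit in the range satisfies digit ≤ lim
  rw [PySem.List.foldl_congr_mem _ _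
    (fun ds d => if d = k then ds
      else if 0 < W then (ds + (d * P * W) % 1000000007) % 1000000007 else ds) 0
    (by
      intro acc x hx
      rcases PySem.List.mem_pyRange_one.mp hx with ⟨_, hx2⟩
      rw [if_pos (by omega : x ≤ lim)])]
  have hAval := pv_foldA P W k hWnn (PySem.List.pyRange s (lim + 1) 1) 0
  rw [show ((0:Int) % 1000000007) = 0 from by norm_num, zero_add] at hAval
  set c := (lim + 1 - s).toNat with hc
  have hrange : PySem.List.pyRange s (lim + 1) 1 = PySem.List.pyRange s (s + (c:Int)) 1 := by
    by_cases h : s ≤ lim + 1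
    · rw [show s + (c:Int) = lim + 1 from by omega]
    · rw [PySem.List.pyRange_one_eq_nil (by omega),
        PySem.List.pyRange_one_eq_nil (by omega)]
  rw [hrange, pv_sumAux k s c] at hAval
  rw [hrange, hAval]
  -- closed forms for the A-side front/back loop values
  have hFeq : F = if 0 < pos then (w0 * 9 ^ (pos - 1).toNat) % 1000000007 else 1 := by
    by_cases h : 0 < pos
    · have haux := pv_frontAux w0 pos.toNat
      rw [show ((pos.toNat : Int)) = pos from by omega] at haux
      rw [hF, haux, if_pos (by omega : 0 < pos.toNat), if_pos h,
        show pos.toNat - 1 = (pos - 1).toNat from by omega]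
    · rw [hF, PySem.List.pyRange_one_eq_nil (by omega), if_neg h]
      rfl
  have hBkeq : Bk = 9 ^ (n - pos - 1).toNat % 1000000007 := by
    have haux := pv_backAux (PySem.List.pyRange (pos + 1) n 1) 1
    rw [show ((1:Int) % 1000000007) = 1 from by norm_num, one_mul,
      PySem.List.length_pyRange_one, show n - (pos + 1) = n - pos - 1 from by ring] at haux
    rw [hBk, haux]
  have hFB : (if pos > 0 then
        ((if k = 0 then (9:Int) else 8) * (9 ^ (pos - 1).toNat % 1000000007)) % 1000000007
      else 1) = F := by
    rw [hFeq]
    by_cases h : 0 < pos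
    · rw [if_pos h, if_pos h, pv_h1]
      by_cases hk : k = 0 <;> simp [hw0, hk]
    · rw [if_neg h, if_neg h]
  rw [hFB, ← hBkeq]
  -- the digit sums agree
  have hS : (if c = 0 then (0:Int)
      else (s + (s + (c:Int) - 1)) * (c:Int) / 2 -
        if s ≤ k ∧ k ≤ s + (c:Int) - 1 then k else 0)
      = (if s > lim then (0:Int)
      else (s + lim) * (lim - s + 1) / 2 - if s ≤ k ∧ k ≤ lim then k else 0) := by
    by_cases hsl : s > lim
    · have hc0 : c = 0 := by omega
      rw [if_pos hsl, if_pos hc0]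
    · have hcne : ¬ (c = 0) := by omega
      rw [if_neg hcne, if_neg hsl, show s + (c:Int) - 1 = lim from by omega,
        show ((c:Int)) = lim - s + 1 from by omega]
  rw [hS]
  -- pure modular algebra
  set D := (if s > lim then (0:Int)
      else (s + lim) * (lim - s + 1) / 2 - if s ≤ k ∧ k ≤ lim then k else 0) with hD
  rw [hWdef, show P * (F * Bk % 1000000007) * D = (F * Bk % 1000000007) * (P * D) from by ring,
    pv_h2]
  rw [pv_h2 (D * P) F, pv_h2 (D * P * F) Bk]
  congr 1
  ring
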